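-- pv_equiv track=rewrite | github.com/leeeee963/agent-translation | src/parser/ass_parser.py | _replace_text_preserve_tags
-- ===== SOURCE A (Python) =====
-- def _replace_text_preserve_tags(raw_text: str, translated: str) -> str:
--     """Replace the visible text while keeping leading ASS override tags."""
--     tags: list[str] = []
--     rest = raw_text
--     while rest.startswith("{"):
--         end = rest.find("}")
--         if end == -1:
--             break
--         tags.append(rest[: end + 1])
--         rest = rest[end + 1:]
--
--     return "".join(tags) + translated
-- ===== SOURCE B (Python) =====
-- def _replace_text_preserve_tags(raw_text: str, translated: str) -> str:
--     """Replace the visible text while keeping leading ASS override tags.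
--
--     Single index scan: advance a cut point past each complete leading
--     {...} tag, then splice once -- no tag list, no join, no re-slicing.
--     """
--     n = len(raw_text)
--     i = 0
--     while i < n and raw_text[i] == "{":
--         j = i + 1
--         while j < n and raw_text[j] != "}":
--             j += 1
--         if j == n:
--             break
--         i = j + 1
--     return raw_text[:i] + translated
-- ===== Notes on version B (the rewrite author's own statement) =====
-- stated objective: simpler
-- what changed: A collects each leading tag by repeated find/slice into a list and joins it; B is a single index scan over the characters that computes the cut point after the last complete leading {...} tag and splices once.
import Mathlib
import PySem

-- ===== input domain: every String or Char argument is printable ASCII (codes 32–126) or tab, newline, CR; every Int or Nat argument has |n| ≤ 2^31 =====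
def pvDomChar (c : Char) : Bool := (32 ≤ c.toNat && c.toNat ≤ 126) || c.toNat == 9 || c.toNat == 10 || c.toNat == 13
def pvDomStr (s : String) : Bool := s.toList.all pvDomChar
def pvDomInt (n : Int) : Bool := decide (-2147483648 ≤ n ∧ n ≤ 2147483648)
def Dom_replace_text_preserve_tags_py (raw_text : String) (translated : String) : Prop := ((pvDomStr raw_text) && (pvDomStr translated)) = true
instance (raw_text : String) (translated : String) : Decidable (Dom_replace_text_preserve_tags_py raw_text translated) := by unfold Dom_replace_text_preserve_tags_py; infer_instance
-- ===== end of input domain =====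

-- B replaces A's tag-list/join/re-slice loop with a single index scan that finds the
-- cut point after the last complete leading {...} tag and splices once (objective: simpler).

-- ===== PORT A =====
-- while rest.startswith("{"): end = rest.find("}"); if end == -1: break;
-- tags.append(rest[:end+1]); rest = rest[end+1:]
def pvA_loop (tags : List (List Char)) (rest : List Char) : List (List Char) :=
  if PySem.Chars.startswith rest ['{'] then
    let e := PySem.Chars.find rest ['}']
    if e = -1 then tags
    else pvA_loop (tags ++ [PySem.List.slice rest none (some (e + 1))])
                  (PySem.List.slice rest (some (e + 1)) none)
  else tags
termination_by rest.length
decreasing_by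
  rename_i h he
  have h0 : (0:Int) ≤ PySem.Chars.find rest ['}'] + 1 := by
    have := PySem.Chars.neg_one_le_find rest ['}']
    omega
  have hne : rest ≠ [] := by
    rw [PySem.Chars.startswith_iff] at h
    rintro rfl; simp at h
  rw [PySem.List.slice_from rest h0]
  have hpos : 0 < rest.length := List.length_pos_iff.mpr hne
  have h1 : 1 ≤ (PySem.Chars.find rest ['}'] + 1).toNat := by omega
  simp only [List.length_drop]
  omega

def replace_text_preserve_tags_py (raw_text : String) (translated : String) : String :=
  String.ofList (PySem.Chars.join [] (pvA_loop [] raw_text.toList) ++ translated.toList)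

-- ===== PORT B =====
-- inner loop: while j < n and raw_text[j] != "}": j += 1
def pvB_inner (cs : List Char) (n j : Nat) : Nat :=
  if j < n ∧ cs.getD j ' ' ≠ '}' then pvB_inner cs n (j + 1) else j
termination_by n - j
decreasing_by omega

theorem pvB_inner_ge (cs : List Char) (n j : Nat) : j ≤ pvB_inner cs n j := by
  fun_induction pvB_inner with
  | case1 => omega
  | case2 => omega

-- outer loop: while i < n and raw_text[i] == "{": … ; if j == n: break; i = j + 1
def pvB_outer (cs : List Char) (n i : Nat) : Nat :=
  if i < n ∧ cs.getD i ' ' = '{' then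
    let j := pvB_inner cs n (i + 1)
    if j = n then i else pvB_outer cs n (j + 1)
  else i
termination_by n - i
decreasing_by
  have := pvB_inner_ge cs n (i + 1)
  omega

def replace_text_preserve_tags_py_alt (raw_text : String) (translated : String) : String :=
  String.ofList (raw_text.toList.take (pvB_outer raw_text.toList raw_text.toList.length 0)
             ++ translated.toList)

-- ===== PRECONDITION & SPEC =====
def Spec_replace_text_preserve_tags_py (raw_text : String) (translated : String) (out : String) : Prop := out = replace_text_preserve_tags_py_alt raw_text translated
instance (raw_text : String) (translated : String) (out : String) : Decidable (Spec_replace_text_preserve_tags_py raw_text translated out) := by unfold Spec_replace_text_preserve_tags_py; infer_instance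

-- ===== CLAIM (what is proved, stated in full; the proofs are below) =====
def Claim_equal_replace_text_preserve_tags_py : Prop := ∀ (raw_text : String) (translated : String), Dom_replace_text_preserve_tags_py raw_text translated → Spec_replace_text_preserve_tags_py raw_text translated (replace_text_preserve_tags_py raw_text translated)

-- ===== LEMMAS AND PROOFS =====

theorem pvJoin_nil_cons (a : List Char) (l : List (List Char)) :
    PySem.Chars.join [] (a :: l) = a ++ PySem.Chars.join [] l := by
  cases l <;>
    simp [PySem.Chars.join_nil, PySem.Chars.join_singleton, PySem.Chars.join_cons_cons]

theorem pvStartswith_singleton (l : List Char) (c : Char) :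
    PySem.Chars.startswith l [c] = true ↔ l.head? = some c := by
  rw [PySem.Chars.startswith_iff]
  cases l <;> simp [List.prefix_cons_iff, eq_comm]

theorem pvSingleton_prefix (m : List Char) (c : Char) :
    [c] <+: m ↔ m.head? = some c := by
  cases m <;> simp [List.prefix_cons_iff, eq_comm]

-- A's accumulator peels off the front
theorem pvA_loop_acc (rest : List Char) (tags : List (List Char)) :
    pvA_loop tags rest = tags ++ pvA_loop [] rest := by
  induction hn : rest.length using Nat.strong_induction_on generalizing rest tags with
  | _ n ih =>
    subst hn
    conv_lhs => rw [pvA_loop]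
    conv_rhs => rw [pvA_loop]
    by_cases h : PySem.Chars.startswith rest ['{'] = true
    · simp only [h, if_true]
      by_cases he : PySem.Chars.find rest ['}'] = -1
      · simp [he]
      · simp only [he, if_false]
        have hlt : (PySem.List.slice rest (some (PySem.Chars.find rest ['}'] + 1)) none).length < rest.length := by
          have h0 : (0:Int) ≤ PySem.Chars.find rest ['}'] + 1 := by
            have := PySem.Chars.neg_one_le_find rest ['}']
            omega
          have hne : rest ≠ [] := by
            rw [PySem.Chars.startswith_iff] at h
            rintro rfl; simp at h
          rw [PySem.List.slice_from rest h0]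
          have hpos : 0 < rest.length := List.length_pos_iff.mpr hne
          have h1 : 1 ≤ (PySem.Chars.find rest ['}'] + 1).toNat := by omega
          simp only [List.length_drop]; omega
        rw [ih _ hlt _ _ rfl, ih _ hlt _ ([] ++ [PySem.List.slice rest none (some (PySem.Chars.find rest ['}'] + 1))]) rfl]
        simp
    · simp [h]

-- first index where p fails, as the takeWhile length
theorem pvTakeWhile_len (l : List Char) (c : Char) (k : Nat) (hk : k < l.length)
    (hget : l[k] = c) (hlt : ∀ i, (h : i < k) → l[i]'(by omega) ≠ c) :
    (l.takeWhile (· ≠ c)).length = k := by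
  induction l generalizing k with
  | nil => simp at hk
  | cons x t ihl =>
    cases k with
    | zero =>
      simp at hget
      simp [hget]
    | succ k =>
      have hx : x ≠ c := hlt 0 (by omega)
      rw [List.takeWhile_cons, if_pos (by simpa using hx), List.length_cons]
      have := ihl k (by simpa using hk) (by simpa using hget)
        (fun i hi => by simpa using hlt (i+1) (by omega))
      omega

-- find of a single char: nonneg and equal to the ≠-takeWhile length, when present
theorem pvFind_singleton (l : List Char) (c : Char) (hc : c ∈ l) :
    0 ≤ PySem.Chars.find l [c] ∧
      (PySem.Chars.find l [c]).toNat = (l.takeWhile (· ≠ c)).length := by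
  have hnn : 0 ≤ PySem.Chars.find l [c] := by
    rw [PySem.Chars.find_nonneg_iff, List.singleton_infix_iff]; exact hc
  refine ⟨hnn, ?_⟩
  obtain ⟨hpre, hmin⟩ := PySem.Chars.find_spec (s := l) (sub := [c]) hnn
  set k := (PySem.Chars.find l [c]).toNat with hk
  rw [pvSingleton_prefix, List.head?_drop] at hpre
  have hklen : k < l.length := by
    by_contra hge
    rw [List.getElem?_eq_none (by omega)] at hpre
    simp at hpre
  have hget : l[k] = c := by
    rw [List.getElem?_eq_getElem hklen] at hpre
    simpa using hpre
  exact (pvTakeWhile_len l c k hklen hget (fun i hi => by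
    have := hmin i hi
    rw [pvSingleton_prefix, List.head?_drop, List.getElem?_eq_getElem (by omega)] at this
    simpa [eq_comm] using this)).symm

-- B's inner loop = start + length of the ≠'}' run
theorem pvB_inner_eq (cs : List Char) (j : Nat) (hj : j ≤ cs.length) :
    pvB_inner cs cs.length j = j + ((cs.drop j).takeWhile (· ≠ '}')).length := by
  induction hm : cs.length - j using Nat.strong_induction_on generalizing j with
  | _ m ih =>
    rw [pvB_inner]
    by_cases hjl : j < cs.length
    · have hdrop := List.drop_eq_getElem_cons (l := cs) hjl
      have hgd : cs.getD j ' ' = cs[j] := List.getD_eq_getElem cs ' ' hjl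
      by_cases hc : cs[j] = '}'
      · rw [if_neg (by rintro ⟨_, hne⟩; exact hne (by rw [hgd, hc]))]
        rw [hdrop, List.takeWhile_cons, if_neg (by simp [hc])]
        simp
      · rw [if_pos ⟨hjl, by rw [hgd]; simpa using hc⟩]
        rw [ih (cs.length - (j+1)) (by omega) (j+1) (by omega) rfl]
        rw [hdrop, List.takeWhile_cons, if_pos (by simpa using hc), List.length_cons]
        omega
    · rw [if_neg (by omega)]
      have : cs.drop j = [] := List.drop_eq_nil_of_le (by omega)
      simp [this]

-- the bridging invariant: B's cut point from i covers exactly A's joined tags of the suffix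
theorem pvBridge (cs : List Char) (i : Nat) (hi : i ≤ cs.length) :
    cs.take (pvB_outer cs cs.length i) =
      cs.take i ++ PySem.Chars.join [] (pvA_loop [] (cs.drop i)) := by
  induction hm : cs.length - i using Nat.strong_induction_on generalizing i with
  | _ m ih =>
    rw [pvB_outer, pvA_loop]
    by_cases h : i < cs.length ∧ cs.getD i ' ' = '{'
    · obtain ⟨hil, hbr⟩ := h
      have hgd : cs.getD i ' ' = cs[i] := List.getD_eq_getElem cs ' ' hil
      have hgeti : cs[i] = '{' := by rw [← hgd, hbr]
      have hdrop := List.drop_eq_getElem_cons (l := cs) hil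
      have hsw : PySem.Chars.startswith (cs.drop i) ['{'] = true := by
        rw [pvStartswith_singleton, hdrop]; simp [hgeti]
      rw [if_pos ⟨hil, hbr⟩]
      simp only [hsw, if_true]
      have hinner := pvB_inner_eq cs (i+1) (by omega)
      by_cases hmem : '}' ∈ cs.drop (i+1)
      · -- a complete tag: both sides consume it and recurse
        have hmem' : '}' ∈ cs.drop i := by
          rw [hdrop]; exact List.mem_cons_of_mem _ hmem
        obtain ⟨hnn, htw⟩ := pvFind_singleton (cs.drop i) '}' hmem'
        have hne1 : PySem.Chars.find (cs.drop i) ['}'] ≠ -1 := by omega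
        rw [if_neg hne1]
        have htwcons : ((cs.drop i).takeWhile (· ≠ '}')).length
            = 1 + ((cs.drop (i+1)).takeWhile (· ≠ '}')).length := by
          rw [hdrop, List.takeWhile_cons, if_pos (by simp [hgeti]), List.length_cons]
          omega
        set tl := ((cs.drop (i+1)).takeWhile (· ≠ '}')).length with htl
        have htlt : tl < (cs.drop (i+1)).length := by
          have hle : tl ≤ (cs.drop (i+1)).length :=
            (List.takeWhile_sublist _).length_le
          rcases Nat.lt_or_ge tl (cs.drop (i+1)).length with h' | h'
          · exact h'
          · exfalso
            have heq : (cs.drop (i+1)).takeWhile (· ≠ '}') = cs.drop (i+1) :=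
              (List.takeWhile_sublist _).eq_of_length_le (by omega)
            have := List.takeWhile_eq_self_iff.mp heq _ hmem
            simp at this
        have hjlt : i + 1 + tl < cs.length := by
          have : (cs.drop (i+1)).length = cs.length - (i+1) := by simp
          omega
        rw [hinner]
        rw [if_neg (by omega)]
        -- A's slices
        have h0 : (0:Int) ≤ PySem.Chars.find (cs.drop i) ['}'] + 1 := by omega
        have hslice1 : PySem.List.slice (cs.drop i) none (some (PySem.Chars.find (cs.drop i) ['}'] + 1))
            = (cs.drop i).take (tl + 2) := by
          rw [PySem.List.slice_to (cs.drop i) h0]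
          congr 1
          omega
        have hslice2 : PySem.List.slice (cs.drop i) (some (PySem.Chars.find (cs.drop i) ['}'] + 1)) none
            = cs.drop (i + 1 + tl + 1) := by
          rw [PySem.List.slice_from (cs.drop i) h0]
          rw [List.drop_drop]
          congr 1
          omega
        rw [hslice1, hslice2, pvA_loop_acc]
        rw [List.nil_append, List.singleton_append, pvJoin_nil_cons]
        rw [ih (cs.length - (i + 1 + tl + 1)) (by omega) (i + 1 + tl + 1) (by omega) rfl]
        rw [← List.append_assoc]
        congr 1
        rw [← List.take_add]
        congr 1
        omega
      · -- unterminated: find = -1 and the inner scan runs off the end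
        have hnone : '}' ∉ cs.drop i := by
          rw [hdrop]; simp [hmem, hgeti]
        have hfind : PySem.Chars.find (cs.drop i) ['}'] = -1 := by
          rw [PySem.Chars.find_eq_neg_one_iff, List.singleton_infix_iff]
          exact hnone
        rw [if_pos hfind]
        have htwall : (cs.drop (i+1)).takeWhile (· ≠ '}') = cs.drop (i+1) :=
          List.takeWhile_eq_self_iff.mpr (fun x hx => by
            simp only [decide_eq_true_eq]
            rintro rfl; exact hmem hx)
        rw [hinner, htwall]
        rw [if_pos (by simp; omega)]
        simp [PySem.Chars.join_nil]
    · rw [if_neg h]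
      have hsw : PySem.Chars.startswith (cs.drop i) ['{'] = false := by
        rcases Nat.lt_or_ge i cs.length with hil | hge
        · have hgd : cs.getD i ' ' = cs[i] := List.getD_eq_getElem cs ' ' hil
          have : cs[i] ≠ '{' := by
            intro hc; exact h ⟨hil, by rw [hgd, hc]⟩
          rw [← Bool.not_eq_true, pvStartswith_singleton,
              List.drop_eq_getElem_cons (l := cs) hil]
          simp [List.getElem?_eq_getElem hil, this]
        · have hnil : cs.drop i = [] := List.drop_eq_nil_of_le (by omega)
          rw [← Bool.not_eq_true, pvStartswith_singleton, hnil]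
          simp
      simp [hsw, PySem.Chars.join_nil]

-- ===== VERDICT (by name: the statement is the Claim_ definition above) =====
theorem replace_text_preserve_tags_py_spec : Claim_equal_replace_text_preserve_tags_py := by
  intro raw t _
  unfold Spec_replace_text_preserve_tags_py replace_text_preserve_tags_py replace_text_preserve_tags_py_alt
  have hb := pvBridge raw.toList 0 (by omega)
  simp only [List.drop_zero, List.take_zero, List.nil_append] at hb
  rw [hb]
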